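-- pv_equiv track=rewrite | github.com/LiamJimenez/Integrales | Calculator.py | obtener_valores_despues_de_corchete
-- ===== SOURCE A (Python) =====
-- def obtener_valores_despues_de_corchete(cadena):
--     valores_despues = ""
--     encontro_corchete = False
--
--     for caracter in cadena:
--         if encontro_corchete:
--             valores_despues += caracter
--         elif caracter == "]":
--             encontro_corchete = True
--
--     return valores_despues
-- ===== SOURCE B (Python) =====
-- def obtener_valores_despues_de_corchete(cadena):
--     return cadena.partition("]")[2]
-- ===== Notes on version B (the rewrite author's own statement) =====
-- stated objective: idiomatic
-- what changed: Replaces the flag-and-accumulate character loop with str.partition on the bracket separator and taking the tail component, which locates the first separator once and returns the remainder in one call.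
import Mathlib
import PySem

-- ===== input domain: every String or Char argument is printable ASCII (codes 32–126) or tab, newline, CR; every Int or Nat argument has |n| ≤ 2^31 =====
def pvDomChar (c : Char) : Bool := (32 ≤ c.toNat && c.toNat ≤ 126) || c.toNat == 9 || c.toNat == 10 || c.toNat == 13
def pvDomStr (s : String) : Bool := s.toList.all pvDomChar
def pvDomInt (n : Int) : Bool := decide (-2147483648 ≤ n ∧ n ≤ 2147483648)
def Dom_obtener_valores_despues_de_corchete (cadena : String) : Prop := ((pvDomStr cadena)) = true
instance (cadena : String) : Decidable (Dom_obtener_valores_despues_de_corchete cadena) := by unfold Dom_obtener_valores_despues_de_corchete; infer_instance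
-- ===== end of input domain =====

-- B replaces A's flag-and-accumulate loop with partition(']') and taking the tail (idiomatic/simpler).

-- ===== PORT A =====
-- the for-loop over the characters, carrying (valores_despues, encontro_corchete)
def obtenerLoopA : List Char → List Char → Bool → List Char
  | [], acc, _ => acc
  | c :: rest, acc, found =>
    if found then obtenerLoopA rest (acc ++ [c]) found
    else if c = ']' then obtenerLoopA rest acc true
    else obtenerLoopA rest acc false

def obtener_valores_despues_de_corchete (cadena : String) : String :=
  String.ofList (obtenerLoopA cadena.toList [] false)

-- ===== PORT B =====
-- cadena.partition("]")[2]: everything after the first ']' (empty when ']' is absent)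
def partitionTail (l : List Char) : List Char :=
  match l.dropWhile (· ≠ ']') with
  | [] => []
  | _ :: r => r

def obtener_valores_despues_de_corchete_alt (cadena : String) : String :=
  String.ofList (partitionTail cadena.toList)

-- ===== PRECONDITION & SPEC =====
def Spec_obtener_valores_despues_de_corchete (cadena : String) (out : String) : Prop := out = obtener_valores_despues_de_corchete_alt cadena
instance (cadena : String) (out : String) : Decidable (Spec_obtener_valores_despues_de_corchete cadena out) := by unfold Spec_obtener_valores_despues_de_corchete; infer_instance

-- ===== CLAIM (what is proved, stated in full; the proofs are below) =====
def Claim_equal_obtener_valores_despues_de_corchete : Prop := ∀ (cadena : String), Dom_obtener_valores_despues_de_corchete cadena → Spec_obtener_valores_despues_de_corchete cadena (obtener_valores_despues_de_corchete cadena)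

-- ===== LEMMAS AND PROOFS =====
theorem obtenerLoopA_true (l acc : List Char) : obtenerLoopA l acc true = acc ++ l := by
  induction l generalizing acc with
  | nil => simp [obtenerLoopA]
  | cons c rest ih => simp [obtenerLoopA, ih]

theorem obtenerLoopA_false (l acc : List Char) :
    obtenerLoopA l acc false = acc ++ partitionTail l := by
  induction l generalizing acc with
  | nil => simp [obtenerLoopA, partitionTail]
  | cons c rest ih =>
    by_cases h : c = ']'
    · simp [obtenerLoopA, partitionTail, h, obtenerLoopA_true, List.dropWhile]
    · simp [obtenerLoopA, partitionTail, h, ih, List.dropWhile]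

-- ===== VERDICT (by name: the statement is the Claim_ definition above) =====
theorem obtener_valores_despues_de_corchete_spec : Claim_equal_obtener_valores_despues_de_corchete := by
  intro cadena _
  unfold Spec_obtener_valores_despues_de_corchete obtener_valores_despues_de_corchete obtener_valores_despues_de_corchete_alt
  rw [obtenerLoopA_false]
  simp
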